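-- pv_equiv track=rewrite | github.com/rowinf/static-site-generator | src/markdown_processing.py | _delimiter_segment
-- ===== SOURCE A (Python) =====
-- def _delimiter_segment(text, delimiter, segments, start=0, inside=False):
--     index = text.find(delimiter, start)
--     if index == -1:
--         segments.append((text[start : len(text)], inside))
--         return segments
--     else:
--         next_start = index + len(delimiter)
--         segments.append((text[start:index], inside))
--         return _delimiter_segment(text, delimiter, segments, next_start, not inside)
-- ===== SOURCE B (Python) =====
-- def _delimiter_segment(text, delimiter, segments, start=0, inside=False):
--     flag = inside
--     for part in text[start:].split(delimiter):
--         segments.append((part, flag))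
--         flag = not flag
--     return segments
-- ===== Notes on version B (the rewrite author's own statement) =====
-- stated objective: idiomatic
-- what changed: Replaces the tail recursion over repeated text.find calls by a single str.split of the suffix text[start:], zipping the parts with alternating flags in one for loop.
-- outside the precondition, e.g. on _delimiter_segment('ab', '', [], 0, False): A raises RecursionError, B raises ValueError; on _delimiter_segment('ab', '', [], 5, True): A returns [('', True)], B raises ValueError
import Mathlib
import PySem

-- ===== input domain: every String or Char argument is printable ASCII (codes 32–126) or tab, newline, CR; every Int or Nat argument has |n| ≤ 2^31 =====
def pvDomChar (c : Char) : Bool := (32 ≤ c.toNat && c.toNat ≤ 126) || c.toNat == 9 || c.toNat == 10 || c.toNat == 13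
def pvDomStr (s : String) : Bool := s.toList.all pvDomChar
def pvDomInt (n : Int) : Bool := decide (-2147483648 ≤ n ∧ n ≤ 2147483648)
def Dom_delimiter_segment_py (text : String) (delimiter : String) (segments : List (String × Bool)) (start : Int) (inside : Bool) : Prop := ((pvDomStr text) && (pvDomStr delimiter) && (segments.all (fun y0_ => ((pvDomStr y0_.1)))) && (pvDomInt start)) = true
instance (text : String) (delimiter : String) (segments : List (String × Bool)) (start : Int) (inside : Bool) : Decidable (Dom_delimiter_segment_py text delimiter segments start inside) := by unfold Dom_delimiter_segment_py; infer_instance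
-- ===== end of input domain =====

-- ===== PORT A =====
-- B replaces A's find-based tail recursion by one str.split of the suffix plus an
-- alternating-flag loop (objective: idiomatic). A also mutates `segments` in place
-- (append); B performs the same appends, so the mutation matches too — the
-- equivalence proved here is about the return value.
-- fuel makes A's tail recursion structurally total; the wrapper passes
-- text.length + 2, which is proved never to run out when delimiter ≠ "" (Pre_).
def dsGo (text : String) (delimiter : String) (fuel : Nat) (segments : List (String × Bool)) (start : Int) (inside : Bool) : List (String × Bool) :=
  match fuel with
  | 0 => segments
  | fuel + 1 =>
    let index := PySem.Str.findFrom text delimiter start none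
    if index = -1 then
      segments ++ [(PySem.Str.slice text (some start) (some (PySem.Str.len text)), inside)]
    else
      let next_start := index + PySem.Str.len delimiter
      dsGo text delimiter fuel (segments ++ [(PySem.Str.slice text (some start) (some index), inside)]) next_start (!inside)

def delimiter_segment_py (text : String) (delimiter : String) (segments : List (String × Bool)) (start : Int) (inside : Bool) : List (String × Bool) :=
  dsGo text delimiter (text.toList.length + 2) segments start inside

-- ===== PORT B =====
def delimiter_segment_py_alt (text : String) (delimiter : String) (segments : List (String × Bool)) (start : Int) (inside : Bool) : List (String × Bool) :=
  -- text[start:].split(delimiter); split? is none only for delimiter = "" (ValueError, outside Pre_)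
  let parts := (PySem.Str.split? (PySem.Str.slice text (some start) none) delimiter).getD []
  (parts.foldl (fun st part => (st.1 ++ [(part, st.2)], !st.2)) (segments, inside)).1

-- ===== PRECONDITION & SPEC =====
-- Pre_ excludes only delimiter = "": there B's str.split raises ValueError, while A
-- recurses into a RecursionError (or, only when start is past the end of text, returns
-- one degenerate segment); on every other input both return.
def Pre_delimiter_segment_py (text : String) (delimiter : String) (segments : List (String × Bool)) (start : Int) (inside : Bool) : Prop := delimiter ≠ ""
instance (text : String) (delimiter : String) (segments : List (String × Bool)) (start : Int) (inside : Bool) : Decidable (Pre_delimiter_segment_py text delimiter segments start inside) := by unfold Pre_delimiter_segment_py; infer_instance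

def pvWitness_delimiter_segment_py : String × String × (List (String × Bool)) × Int × Bool := ("a*b*c", "*", [], 0, false)

def Spec_delimiter_segment_py (text : String) (delimiter : String) (segments : List (String × Bool)) (start : Int) (inside : Bool) (out : List (String × Bool)) : Prop := out = delimiter_segment_py_alt text delimiter segments start inside
instance (text : String) (delimiter : String) (segments : List (String × Bool)) (start : Int) (inside : Bool) (out : List (String × Bool)) : Decidable (Spec_delimiter_segment_py text delimiter segments start inside out) := by unfold Spec_delimiter_segment_py; infer_instance

-- ===== CLAIM (what is proved, stated in full; the proofs are below) =====
def Claim_equal_delimiter_segment_py : Prop := ∀ (text : String) (delimiter : String) (segments : List (String × Bool)) (start : Int) (inside : Bool), Dom_delimiter_segment_py text delimiter segments start inside → Pre_delimiter_segment_py text delimiter segments start inside → Spec_delimiter_segment_py text delimiter segments start inside (delimiter_segment_py text delimiter segments start inside)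

-- ===== LEMMAS AND PROOFS =====

def pieces2 (sep : List Char) (pre : List Char) (l : List Char) : List (List Char) :=
  if h : sep ≠ [] ∧ sep.isPrefixOf l then pre :: pieces2 sep [] (l.drop sep.length)
  else
    match l with
    | [] => [pre]
    | c :: rest => pieces2 sep (pre ++ [c]) rest
termination_by l.length
decreasing_by
  · have hp : sep <+: l := List.isPrefixOf_iff_prefix.mp h.2
    have h1 : sep.length ≤ l.length := hp.length_le
    have h2 : 0 < sep.length := List.length_pos_iff.mpr h.1
    simp only [List.length_drop]; omega
  · simp
theorem pieces2_ne_nil (sep pre l : List Char) : pieces2 sep pre l ≠ [] := by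
  induction pre, l using pieces2.induct sep with
  | case1 pre l h ih => rw [pieces2, dif_pos h]; simp
  | case2 pre h => rw [pieces2, dif_neg h]; simp
  | case3 pre c rest h ih => rw [pieces2, dif_neg h]; exact ih
theorem pieces2_length_le (sep pre l : List Char) : (pieces2 sep pre l).length ≤ l.length + 1 := by
  induction pre, l using pieces2.induct sep with
  | case1 pre l h ih =>
    rw [pieces2, dif_pos h]
    have h2 : 0 < sep.length := List.length_pos_iff.mpr h.1
    have h3 : sep.length ≤ l.length := (List.isPrefixOf_iff_prefix.mp h.2).length_le
    simp only [List.length_cons, List.length_drop] at ih ⊢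
    omega
  | case2 pre h => rw [pieces2, dif_neg h]; simp
  | case3 pre c rest h ih =>
    rw [pieces2, dif_neg h]
    exact Nat.le_trans ih (by simp)
theorem find_nil_of_ne (sub : List Char) (h : sub ≠ []) : PySem.Chars.find [] sub = -1 := by
  rw [PySem.Chars.find_eq_neg_one_iff]
  intro hin
  exact h (List.eq_nil_of_infix_nil hin)

theorem find_eq_natCast (l sub : List Char) (k : Nat)
    (h1 : sub <+: l.drop k) (h2 : ∀ i < k, ¬ sub <+: l.drop i) :
    PySem.Chars.find l sub = (k : Int) := by
  have hinf : sub <:+: l := List.infix_iff_prefix_suffix.mpr ⟨l.drop k, h1, List.drop_suffix k l⟩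
  have h0 : 0 ≤ PySem.Chars.find l sub := (PySem.Chars.find_nonneg_iff l sub).mpr hinf
  obtain ⟨hp, hmin⟩ := PySem.Chars.find_spec h0
  have : (PySem.Chars.find l sub).toNat = k := by
    rcases Nat.lt_trichotomy (PySem.Chars.find l sub).toNat k with hlt | heq | hgt
    · exact absurd hp (h2 _ hlt)
    · exact heq
    · exact absurd h1 (hmin _ hgt)
  omega

theorem find_prefix (l sub : List Char) (h : sub <+: l) : PySem.Chars.find l sub = 0 := by
  have := find_eq_natCast l sub 0 (by simpa using h) (by omega)
  simpa using this

theorem find_cons_neg_iff (c : Char) (rest sub : List Char) (h : ¬ sub <+: (c :: rest)) :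
    (PySem.Chars.find (c :: rest) sub = -1 ↔ PySem.Chars.find rest sub = -1) := by
  rw [PySem.Chars.find_eq_neg_one_iff, PySem.Chars.find_eq_neg_one_iff]
  constructor
  · intro hn hin; exact hn (List.infix_cons_iff.mpr (Or.inr hin))
  · intro hn hin
    rcases List.infix_cons_iff.mp hin with hpre | hin2
    · exact h hpre
    · exact hn hin2

theorem find_cons_pos (c : Char) (rest sub : List Char) (h : ¬ sub <+: (c :: rest))
    (h0 : 0 ≤ PySem.Chars.find rest sub) :
    PySem.Chars.find (c :: rest) sub = 1 + PySem.Chars.find rest sub := by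
  obtain ⟨hp, hmin⟩ := PySem.Chars.find_spec h0
  have := find_eq_natCast (c :: rest) sub ((PySem.Chars.find rest sub).toNat + 1)
    (by simpa using hp)
    (by
      intro i hi
      cases i with
      | zero => simpa using h
      | succ i' => simpa using hmin i' (by omega))
  omega

theorem pieces2_find (sep : List Char) (hsep : sep ≠ []) (l pre : List Char) :
    pieces2 sep pre l =
      if PySem.Chars.find l sep = -1 then [pre ++ l]
      else (pre ++ l.take (PySem.Chars.find l sep).toNat) ::
        pieces2 sep [] (l.drop ((PySem.Chars.find l sep).toNat + sep.length)) := by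
  induction l generalizing pre with
  | nil =>
    rw [find_nil_of_ne sep hsep, if_pos rfl, pieces2,
      dif_neg (by simp [List.isPrefixOf_iff_prefix, List.prefix_nil, hsep])]
    simp
  | cons c rest ih =>
    by_cases hp : sep <+: (c :: rest)
    · rw [pieces2, dif_pos ⟨hsep, List.isPrefixOf_iff_prefix.mpr hp⟩]
      rw [find_prefix _ _ hp]
      simp
    · rw [pieces2, dif_neg (by simp [List.isPrefixOf_iff_prefix]; intro _; exact hp)]
      show pieces2 sep (pre ++ [c]) rest = _
      rw [ih (pre ++ [c])]
      rcases Int.lt_or_le (PySem.Chars.find rest sep) 0 with hneg | hpos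
      · have hr : PySem.Chars.find rest sep = -1 := by
          have := PySem.Chars.neg_one_le_find rest sep; omega
        have hl : PySem.Chars.find (c :: rest) sep = -1 := (find_cons_neg_iff c rest sep hp).mpr hr
        rw [if_pos hr, if_pos hl]; simp
      · have hl : PySem.Chars.find (c :: rest) sep = 1 + PySem.Chars.find rest sep :=
          find_cons_pos c rest sep hp hpos
        have hr' : ¬ PySem.Chars.find rest sep = -1 := by omega
        have hl' : ¬ PySem.Chars.find (c :: rest) sep = -1 := by omega
        rw [if_neg hr', if_neg hl']
        have ht : (PySem.Chars.find (c :: rest) sep).toNat = (PySem.Chars.find rest sep).toNat + 1 := by omega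
        rw [ht]
        simp only [List.take_succ_cons, List.cons_append, List.append_assoc, List.singleton_append]
        have h5 : (PySem.Chars.find rest sep).toNat + 1 + sep.length
            = ((PySem.Chars.find rest sep).toNat + sep.length) + 1 := by omega
        rw [h5, List.drop_succ_cons]
        simp
theorem splitOn_go_eq (sep : List Char) (hsep : sep ≠ []) :
    ∀ (fuel : Nat) (l cur : List Char) (acc : List (List Char)), l.length < fuel →
      PySem.Chars.splitOn.go sep fuel l cur acc = acc.reverse ++ pieces2 sep cur.reverse l := by
  intro fuel
  induction fuel with
  | zero => intro l cur acc h; omega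
  | succ n ih =>
    intro l cur acc h
    cases l with
    | nil =>
      rw [PySem.Chars.splitOn.go]
      · rw [pieces2, dif_neg (by simp [List.isPrefixOf_iff_prefix, List.prefix_nil, hsep])]
        simp
      · omega
    | cons c rest =>
      by_cases hp : sep.isPrefixOf (c :: rest)
      · rw [PySem.Chars.splitOn.go]
        simp only [hp, if_pos]
        rw [ih _ _ _ (by
          have h1 : sep.length ≤ (c :: rest).length := (List.isPrefixOf_iff_prefix.mp hp).length_le
          have h2 : 0 < sep.length := List.length_pos_iff.mpr hsep
          simp only [List.length_drop, List.length_cons] at *; omega)]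
        conv_rhs => rw [pieces2]
        rw [dif_pos ⟨hsep, hp⟩]
        simp
      · rw [PySem.Chars.splitOn.go]
        simp only [hp, if_neg, Bool.false_eq_true, not_false_iff]
        rw [ih _ _ _ (by simp at h ⊢; omega)]
        conv_rhs => rw [pieces2]
        rw [dif_neg (by simpa using fun _ => hp)]
        simp
theorem splitOn_eq_pieces2 (s sep : List Char) (hsep : sep ≠ []) :
    PySem.Chars.splitOn s sep = pieces2 sep [] s := by
  rw [PySem.Chars.splitOn]
  simpa using splitOn_go_eq sep hsep (s.length + 1) s [] [] (by omega)
theorem slice_to_len (s : List Char) (start : Int) :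
    PySem.Chars.slice s (some start) (some (s.length : Int)) =
      s.drop (PySem.List.clampIdx s.length start) := by
  simp only [PySem.Chars.slice_eq_listSlice, PySem.List.slice]
  have h1 : PySem.List.clampIdx s.length (s.length : Int) = s.length := by
    simp [PySem.List.clampIdx]
  rw [h1]
  exact List.take_of_length_le (by simp)

theorem clampIdx_le_len (s : List Char) (start : Int) : PySem.List.clampIdx s.length start ≤ s.length := by
  simp only [PySem.List.clampIdx]
  split_ifs <;> omega

theorem slice_clamp_add (s : List Char) (start : Int) (j : Nat)
    (hj : PySem.List.clampIdx s.length start + j ≤ s.length) :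
    PySem.Chars.slice s (some start) (some ((PySem.List.clampIdx s.length start + j : Nat) : Int)) =
      (s.drop (PySem.List.clampIdx s.length start)).take j := by
  simp only [PySem.Chars.slice_eq_listSlice, PySem.List.slice]
  have h1 : PySem.List.clampIdx s.length ((PySem.List.clampIdx s.length start + j : Nat) : Int)
      = PySem.List.clampIdx s.length start + j := by
    rw [PySem.List.clampIdx_natCast]
    omega
  rw [h1]
  congr 1
  omega
theorem findFrom_clamp (s sub : List Char) (start : Int) (h : sub ≠ []) :
    PySem.Chars.findFrom s sub start none =
      if PySem.Chars.find (s.drop (PySem.List.clampIdx s.length start)) sub = -1 then -1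
      else (PySem.List.clampIdx s.length start : Int) +
        PySem.Chars.find (s.drop (PySem.List.clampIdx s.length start)) sub := by
  have hfnil : PySem.Chars.find [] sub = -1 := find_nil_of_ne sub h
  simp only [PySem.Chars.findFrom, PySem.List.clampIdx]
  by_cases hneg : start < 0
  · by_cases hz : start + (s.length : Int) < 0
    · simp only [if_pos hneg, if_pos hz, if_pos (show (s.length : Int) + start < 0 by omega)]
      rw [if_neg (show ¬((s.length : Int) < 0) by omega)]
      simp only [Int.toNat_zero, List.drop_zero]
      rw [List.take_of_length_le (by simp)]
      split_ifs <;> omega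
    · simp only [if_pos hneg, if_neg hz, if_neg (show ¬((s.length : Int) + start < 0) by omega)]
      rw [if_neg (show ¬((s.length : Int) < start + (s.length : Int)) by omega)]
      rw [show ((s.length : Int)).toNat = s.length by omega, List.take_length]
      rw [show (start + (s.length : Int)).toNat = ((s.length : Int) + start).toNat by omega]
      split_ifs <;> omega
  · simp only [if_neg hneg]
    by_cases hgt : (s.length : Int) < start
    · rw [if_pos hgt]
      rw [show min start.toNat s.length = s.length by omega]
      rw [List.drop_length, hfnil, if_pos rfl]
    · rw [if_neg hgt]
      rw [show ((s.length : Int)).toNat = s.length by omega, List.take_length]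
      rw [show min start.toNat s.length = start.toNat by omega]
      split_ifs <;> omega
def tagS : Bool → List (List Char) → List (String × Bool)
  | _, [] => []
  | b, p :: ps => (String.ofList p, b) :: tagS (!b) ps
theorem dsGo_eq (text delimiter : String) (hsep : delimiter.toList ≠ []) :
    ∀ (fuel : Nat) (start : Int) (segments : List (String × Bool)) (inside : Bool),
      (pieces2 delimiter.toList [] (text.toList.drop (PySem.List.clampIdx text.toList.length start))).length ≤ fuel →
      dsGo text delimiter fuel segments start inside =
        segments ++ tagS inside (pieces2 delimiter.toList [] (text.toList.drop (PySem.List.clampIdx text.toList.length start))) := by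
  intro fuel
  induction fuel with
  | zero =>
    intro start segments inside hf
    exact absurd hf (by
      have := pieces2_ne_nil delimiter.toList [] (text.toList.drop (PySem.List.clampIdx text.toList.length start))
      cases hh : pieces2 delimiter.toList [] (text.toList.drop (PySem.List.clampIdx text.toList.length start)) with
      | nil => exact absurd hh this
      | cons a b => simp [hh])
  | succ n ih =>
    intro start segments inside hf
    rw [dsGo]
    simp only [PySem.Str.findFrom_eq, PySem.Str.len]
    rw [findFrom_clamp text.toList delimiter.toList start hsep]
    set s := text.toList with hs
    set sep := delimiter.toList with hsepdef
    set c := PySem.List.clampIdx s.length start with hc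
    set u := s.drop c with hu
    by_cases hfind : PySem.Chars.find u sep = -1
    · rw [if_pos hfind, if_pos rfl]
      rw [pieces2_find sep hsep u [], if_pos hfind]
      have hslice : PySem.Str.slice text (some start) (some (s.length : Int)) = String.ofList u := by
        rw [PySem.Str.slice, slice_to_len]
      rw [hslice]
      simp [tagS]
    · have hge : 0 ≤ PySem.Chars.find u sep := by
        have := PySem.Chars.neg_one_le_find u sep; omega
      rw [if_neg hfind]
      rw [if_neg (by omega)]
      set j := (PySem.Chars.find u sep).toNat with hj
      have hcle : c ≤ s.length := clampIdx_le_len s start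
      have hjlen : c + (j + sep.length) ≤ s.length := by
        obtain ⟨hp, -⟩ := PySem.Chars.find_spec hge
        have h1 : sep.length ≤ u.length - j := by simpa [hj] using hp.length_le
        have h2 : u.length = s.length - c := by rw [hu]; simp
        have h3 : PySem.Chars.find u sep ≤ (u.length : Int) := PySem.Chars.find_le_length u sep
        omega
      have hidx : (c : Int) + PySem.Chars.find u sep = ((c + j : Nat) : Int) := by omega
      have hslice2 : PySem.Str.slice text (some start) (some ((c : Int) + PySem.Chars.find u sep)) = String.ofList (u.take j) := by
        rw [PySem.Str.slice, hidx, slice_clamp_add s start j (by omega), ← hc, ← hu]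
      rw [hslice2]
      have hnext : (c : Int) + PySem.Chars.find u sep + (sep.length : Int) = ((c + j + sep.length : Nat) : Int) := by omega
      have hclamp2 : PySem.List.clampIdx s.length ((c + j + sep.length : Nat) : Int) = c + j + sep.length := by
        rw [PySem.List.clampIdx_natCast]; omega
      have hdrop : List.drop (c + j + sep.length) s = u.drop (j + sep.length) := by
        rw [hu, List.drop_drop, Nat.add_assoc]
      rw [hnext, ih]
      · rw [hclamp2, hdrop]
        conv_rhs => rw [pieces2_find sep hsep u [], if_neg hfind]
        simp [tagS, hj]
      · rw [hclamp2, hdrop]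
        have hlen : (pieces2 sep [] u).length ≤ n + 1 := hf
        rw [pieces2_find sep hsep u [], if_neg hfind] at hlen
        simpa [hj] using Nat.le_of_succ_le_succ hlen
theorem foldl_tag (ps : List (List Char)) :
    ∀ (segments : List (String × Bool)) (flag : Bool),
      ((ps.map String.ofList).foldl (fun st part => (st.1 ++ [(part, st.2)], !st.2)) (segments, flag)).1 =
        segments ++ tagS flag ps := by
  induction ps with
  | nil => intro segments flag; simp [tagS]
  | cons p ps ih =>
    intro segments flag
    simp only [List.map_cons, List.foldl_cons, tagS]
    rw [ih]
    simp
theorem alt_eq (text delimiter : String) (hsep : delimiter.toList ≠ []) (segments : List (String × Bool)) (start : Int) (inside : Bool) :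
    delimiter_segment_py_alt text delimiter segments start inside =
      segments ++ tagS inside (pieces2 delimiter.toList [] (text.toList.drop (PySem.List.clampIdx text.toList.length start))) := by
  unfold delimiter_segment_py_alt
  have hslice : PySem.Str.slice text (some start) none = String.ofList (text.toList.drop (PySem.List.clampIdx text.toList.length start)) := by
    rw [PySem.Str.slice]
    congr 1
    simp only [PySem.Chars.slice_eq_listSlice, PySem.List.slice]
    exact List.take_of_length_le (by simp)
  rw [hslice]
  have hsplit : PySem.Str.split? (String.ofList (text.toList.drop (PySem.List.clampIdx text.toList.length start))) delimiter
      = some ((pieces2 delimiter.toList [] (text.toList.drop (PySem.List.clampIdx text.toList.length start))).map String.ofList) := by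
    rw [PySem.Str.split?]
    rw [PySem.Chars.split?]
    rw [if_neg (by simpa using hsep)]
    simp only [Option.map_some]
    congr 1
    rw [show (String.ofList (text.toList.drop (PySem.List.clampIdx text.toList.length start))).toList
        = text.toList.drop (PySem.List.clampIdx text.toList.length start) by simp]
    rw [splitOn_eq_pieces2 _ _ hsep]
  rw [hsplit]
  simp only [Option.getD_some]
  exact foldl_tag _ segments inside

-- ===== VERDICT (by name: the statement is the Claim_ definition above) =====
theorem delimiter_segment_py_spec : Claim_equal_delimiter_segment_py := by
  intro text delimiter segments start inside _ hpre
  unfold Spec_delimiter_segment_py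
  have hsep : delimiter.toList ≠ [] := by
    intro h; exact hpre (by simpa using congrArg String.ofList h)
  rw [delimiter_segment_py, dsGo_eq text delimiter hsep _ _ _ _ ?hf, alt_eq text delimiter hsep]
  case hf =>
    have h1 := pieces2_length_le delimiter.toList [] (text.toList.drop (PySem.List.clampIdx text.toList.length start))
    have h2 : (text.toList.drop (PySem.List.clampIdx text.toList.length start)).length ≤ text.toList.length := by
      simp
    omega
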